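-- pv_equiv track=rewrite | github.com/danielmichaelni/live-coding-interview-problems | bomberman.py | get_row_kill_scores
-- ===== SOURCE A (Python) =====
-- def get_row_kill_scores(grid):
--     kill_scores = [[0 for j in range(len(grid[0]))] for i in range(len(grid))]
--     for i in range(len(grid)):
--         start = 0
--         enemies_killed = 0
--         for j in range(len(grid[0])):
--             if grid[i][j] == 'E':
--                 enemies_killed += 1
--             elif grid[i][j] == 'W':
--                 for k in range(start, j):
--                     if grid[i][k] == '0':
--                         kill_scores[i][k] = enemies_killed
--                 start = j
--                 enemies_killed = 0
--         for k in range(start, len(grid[0])):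
--             if grid[i][k] == '0':
--                 kill_scores[i][k] = enemies_killed
--     return kill_scores
-- ===== SOURCE B (Python) =====
-- def get_row_kill_scores(grid):
--     width = len(grid[0])
--     result = []
--     for row in grid:
--         walls = [j for j in range(width) if row[j] == 'W']
--         bounds = [0] + walls + [width]
--         score = [0] * width
--         for s, e in zip(bounds, bounds[1:]):
--             cnt = row[s:e].count('E')
--             for k in range(s, e):
--                 if row[k] == '0':
--                     score[k] = cnt
--         result.append(score)
--     return result
-- ===== Notes on version B (the rewrite author's own statement) =====
-- stated objective: alternative
-- what changed: B processes each row independently: it first lists the wall columns and forms the segment boundaries, computes each segment's enemy count with one slice-count, and then fills the '0' cells of that segment, instead of A's single left-to-right scan that carries a running start/enemy-counter state and back-fills on every wall.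
-- outside the precondition, e.g. on get_row_kill_scores([]): A returns [], B raises IndexError
import Mathlib
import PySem

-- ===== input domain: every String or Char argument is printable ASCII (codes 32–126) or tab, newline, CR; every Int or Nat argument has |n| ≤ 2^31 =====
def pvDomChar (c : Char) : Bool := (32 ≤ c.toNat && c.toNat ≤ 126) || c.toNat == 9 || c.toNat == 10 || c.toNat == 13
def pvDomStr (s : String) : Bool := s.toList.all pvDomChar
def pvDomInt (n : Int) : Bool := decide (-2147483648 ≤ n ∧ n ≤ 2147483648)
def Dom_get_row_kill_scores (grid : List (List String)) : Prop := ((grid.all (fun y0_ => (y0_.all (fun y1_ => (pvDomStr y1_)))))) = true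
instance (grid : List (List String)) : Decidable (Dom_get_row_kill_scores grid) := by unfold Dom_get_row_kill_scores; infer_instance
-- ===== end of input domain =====

-- B recomputes each row independently: it lists the wall columns, forms the segment
-- boundaries, counts the enemies of each segment with one slice-count, and then fills the
-- '0' cells of the segment — a per-segment decomposition instead of A's single left-to-right
-- scan with running state (objective: alternative decomposition, same asymptotic cost).

-- ===== PORT A =====
-- helper: the inner "for k in range(a, b): if grid[i][k] == '0': kill_scores[i][k] = en" loop
def pvFillA (grid : List (List String)) (i : Int) (ks : List (List Int)) (a b en : Int) : List (List Int) :=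
  (PySem.List.pyRange a b 1).foldl (fun ks k =>
    if PySem.List.pyGetD (PySem.List.pyGetD grid i []) k "" = "0"
    then ks.modify i.toNat (fun r => r.set k.toNat en) else ks) ks

def get_row_kill_scores (grid : List (List String)) : List (List Int) :=
  let w : Int := ((PySem.List.pyGetD grid 0 []).length : Int)
  let ks0 : List (List Int) :=
    (PySem.List.pyRange 0 (grid.length : Int) 1).map
      (fun _ => (PySem.List.pyRange 0 w 1).map (fun _ => (0 : Int)))
  (PySem.List.pyRange 0 (grid.length : Int) 1).foldl (fun ks i =>
    let st := (PySem.List.pyRange 0 w 1).foldl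
      (fun (acc : List (List Int) × Int × Int) j =>
        let c := PySem.List.pyGetD (PySem.List.pyGetD grid i []) j ""
        if c = "E" then (acc.1, acc.2.1, acc.2.2 + 1)
        else if c = "W" then (pvFillA grid i acc.1 acc.2.1 j acc.2.2, j, 0)
        else acc) (ks, 0, 0)
    pvFillA grid i st.1 st.2.1 w st.2.2) ks0

-- ===== PORT B =====
-- helper: one segment: cnt = row[s:e].count('E'); fill the '0' cells of [s, e)
def pvFillSeg (row : List String) (sc : List Int) (s e : Int) : List Int :=
  let cnt : Int := ((PySem.List.slice row (some s) (some e)).count "E" : Int)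
  (PySem.List.pyRange s e 1).foldl (fun sc k =>
    if PySem.List.pyGetD row k "" = "0" then sc.set k.toNat cnt else sc) sc

def get_row_kill_scores_alt (grid : List (List String)) : List (List Int) :=
  let width : Int := ((PySem.List.pyGetD grid 0 []).length : Int)
  grid.foldl (fun result row =>
    let walls := (PySem.List.pyRange 0 width 1).filter
      (fun j => PySem.List.pyGetD row j "" == "W")
    let bounds := 0 :: (walls ++ [width])
    let score := (bounds.zip bounds.tail).foldl
      (fun sc se => pvFillSeg row sc se.1 se.2) (List.replicate width.toNat (0 : Int))
    result ++ [score]) []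

-- ===== PRECONDITION & SPEC =====
-- Pre_ excludes grids with a row shorter than the first row, on which A raises IndexError,
-- and the empty grid, on which A returns [] without ever evaluating grid[0] while B's
-- width = len(grid[0]) raises IndexError there.
def Pre_get_row_kill_scores (grid : List (List String)) : Prop :=
  grid ≠ [] ∧ ∀ row ∈ grid, (grid.headD []).length ≤ row.length
instance (grid : List (List String)) : Decidable (Pre_get_row_kill_scores grid) := by
  unfold Pre_get_row_kill_scores; infer_instance
def pvWitness_get_row_kill_scores : List (List String) :=
  [["0", "E", "W", "0"], ["E", "0", "0", "W"]]
def Spec_get_row_kill_scores (grid : List (List String)) (out : List (List Int)) : Prop :=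
  out = get_row_kill_scores_alt grid
instance (grid : List (List String)) (out : List (List Int)) : Decidable (Spec_get_row_kill_scores grid out) := by
  unfold Spec_get_row_kill_scores; infer_instance

-- ===== CLAIM (what is proved, stated in full; the proofs are below) =====
def Claim_equal_get_row_kill_scores : Prop := ∀ (grid : List (List String)), Dom_get_row_kill_scores grid → Pre_get_row_kill_scores grid → Spec_get_row_kill_scores grid (get_row_kill_scores grid)

-- ===== LEMMAS AND PROOFS =====

-- row-level versions of A's loops
def pvFillRow (row : List String) (sc : List Int) (a b en : Int) : List Int :=
  (PySem.List.pyRange a b 1).foldl (fun sc k =>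
    if PySem.List.pyGetD row k "" = "0" then sc.set k.toNat en else sc) sc

def pvStepSC (row : List String) (acc : List Int × Int × Int) (j : Int) : List Int × Int × Int :=
  let c := PySem.List.pyGetD row j ""
  if c = "E" then (acc.1, acc.2.1, acc.2.2 + 1)
  else if c = "W" then (pvFillRow row acc.1 acc.2.1 j acc.2.2, j, 0)
  else acc

def pvScanA (row : List String) (w a s en : Int) (sc : List Int) : List Int :=
  let st := (PySem.List.pyRange a w 1).foldl (pvStepSC row) (sc, s, en)
  pvFillRow row st.1 st.2.1 w st.2.2

def pvScanB (row : List String) (w a s : Int) (sc : List Int) : List Int :=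
  let bounds := s :: ((PySem.List.pyRange a w 1).filter (fun j => PySem.List.pyGetD row j "" == "W") ++ [w])
  (bounds.zip bounds.tail).foldl (fun sc se => pvFillSeg row sc se.1 se.2) sc

def pvCountE (row : List String) (s a : Int) : Int :=
  ((PySem.List.slice row (some s) (some a)).count "E" : Int)

theorem pvStepSC_E (row : List String) (sc : List Int) (s en j : Int)
    (h : PySem.List.pyGetD row j "" = "E") : pvStepSC row (sc, s, en) j = (sc, s, en + 1) := by
  simp [pvStepSC, h]

theorem pvStepSC_W (row : List String) (sc : List Int) (s en j : Int)
    (_hE : ¬ PySem.List.pyGetD row j "" = "E") (hW : PySem.List.pyGetD row j "" = "W") :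
    pvStepSC row (sc, s, en) j = (pvFillRow row sc s j en, j, 0) := by
  simp [pvStepSC, hW]

theorem pvStepSC_O (row : List String) (sc : List Int) (s en j : Int)
    (hE : ¬ PySem.List.pyGetD row j "" = "E") (hW : ¬ PySem.List.pyGetD row j "" = "W") :
    pvStepSC row (sc, s, en) j = (sc, s, en) := by
  simp [pvStepSC, hE, hW]

theorem pv_modify_modify {α : Type} (l : List α) (i : Nat) (f g : α → α) :
    (l.modify i f).modify i g = l.modify i (fun x => g (f x)) := by
  induction l generalizing i with
  | nil => simp
  | cons x xs ih =>
    cases i with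
    | zero => simp [List.modify_zero_cons]
    | succ n => simp [List.modify_succ_cons, ih]

theorem pv_fill_aux (row : List String) (n : Nat) (en : Int) (L : List Int) :
    ∀ (ks : List (List Int)),
      L.foldl (fun ks k =>
          if PySem.List.pyGetD row k "" = "0"
          then ks.modify n (fun r => r.set k.toNat en) else ks) ks
        = ks.modify n (fun r =>
            L.foldl (fun r k =>
              if PySem.List.pyGetD row k "" = "0" then r.set k.toNat en else r) r) := by
  induction L with
  | nil => intro ks; exact (List.modify_id n ks).symm
  | cons k rest ih =>
    intro ks
    by_cases h : PySem.List.pyGetD row k "" = "0"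
    · simp only [List.foldl_cons, if_pos h, ih, pv_modify_modify]
    · simp only [List.foldl_cons, if_neg h, ih]

theorem pvFillA_modify (grid : List (List String)) (i : Int) (ks : List (List Int)) (a b en : Int) :
    pvFillA grid i ks a b en
      = ks.modify i.toNat (fun r => pvFillRow (PySem.List.pyGetD grid i []) r a b en) := by
  exact pv_fill_aux (PySem.List.pyGetD grid i []) i.toNat en (PySem.List.pyRange a b 1) ks

theorem pv_snd_const (row : List String) (L : List Int) :
    ∀ (sc sc' : List Int) (s en : Int),
      (L.foldl (pvStepSC row) (sc, s, en)).2 = (L.foldl (pvStepSC row) (sc', s, en)).2 := by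
  induction L with
  | nil => intro sc sc' s en; rfl
  | cons j rest ih =>
    intro sc sc' s en
    by_cases hE : PySem.List.pyGetD row j "" = "E"
    · simpa [pvStepSC, hE] using ih _ _ s (en + 1)
    · by_cases hW : PySem.List.pyGetD row j "" = "W"
      · simpa [pvStepSC, hE, hW] using ih _ _ j 0
      · simpa [pvStepSC, hE, hW] using ih _ _ s en

theorem pv_inner_eq (grid : List (List String)) (i : Int) (L : List Int) :
    ∀ (ks : List (List Int)) (s en : Int),
      L.foldl (fun (acc : List (List Int) × Int × Int) j =>
        let c := PySem.List.pyGetD (PySem.List.pyGetD grid i []) j ""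
        if c = "E" then (acc.1, acc.2.1, acc.2.2 + 1)
        else if c = "W" then (pvFillA grid i acc.1 acc.2.1 j acc.2.2, j, 0)
        else acc) (ks, s, en)
      = (ks.modify i.toNat
           (fun r => (L.foldl (pvStepSC (PySem.List.pyGetD grid i [])) (r, s, en)).1),
         (L.foldl (pvStepSC (PySem.List.pyGetD grid i [])) (([] : List Int), s, en)).2) := by
  induction L with
  | nil =>
    intro ks s en
    exact congrArg (fun x => (x, s, en)) (List.modify_id i.toNat ks).symm
  | cons j rest ih =>
    intro ks s en
    by_cases hE : PySem.List.pyGetD (PySem.List.pyGetD grid i []) j "" = "E"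
    · simp only [List.foldl_cons, hE, if_pos]
      simpa [hE, pvStepSC_E _ _ _ _ _ hE] using ih ks s (en + 1)
    · by_cases hW : PySem.List.pyGetD (PySem.List.pyGetD grid i []) j "" = "W"
      · simp only [List.foldl_cons, if_neg hE, if_pos hW,
          pvStepSC_W _ _ _ _ _ hE hW]
        rw [ih (pvFillA grid i ks s j en) j 0, pvFillA_modify, pv_modify_modify]
        exact congrArg₂ Prod.mk rfl
          (pv_snd_const (PySem.List.pyGetD grid i []) rest _ _ j 0)
      · simp only [List.foldl_cons, if_neg hE, if_neg hW,
          pvStepSC_O _ _ _ _ _ hE hW]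
        exact ih ks s en

theorem pv_modify_append_cons {α : Type} (l : List α) (x : α) (t : List α) (f : α → α) :
    (l ++ x :: t).modify l.length f = l ++ f x :: t := by
  induction l with
  | nil => simp [List.modify_zero_cons]
  | cons y ys ih => simp [List.modify_succ_cons, ih]

theorem pv_foldl_range_modify {α : Type} (g : Nat → α → α) :
    ∀ (ks tail : List α),
      (List.range ks.length).foldl (fun a i => a.modify i (g i)) (ks ++ tail)
        = (ks.mapIdx (fun i x => g i x)) ++ tail := by
  intro ks
  induction ks using List.reverseRecOn with
  | nil => intro tail; simp
  | append_singleton l x ih =>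
    intro tail
    rw [List.length_append, List.length_singleton, List.range_succ, List.foldl_append]
    rw [List.append_assoc, List.singleton_append, ih (x :: tail)]
    simp only [List.foldl_cons, List.foldl_nil]
    have hlen : (l.mapIdx fun i x => g i x).length = l.length := by simp
    rw [← hlen, pv_modify_append_cons]
    simp [List.mapIdx_append]

theorem pv_mapIdx_replicate {α : Type} (g : Nat → α → α) (n : Nat) (z : α) :
    (List.replicate n z).mapIdx (fun i x => g i x) = (List.range n).map (fun i => g i z) := by
  apply List.ext_getElem <;> simp

theorem pvCountE_self (row : List String) (a : Int) : pvCountE row a a = 0 := by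
  rcases lt_or_ge a 0 with h | h
  · simp [pvCountE, PySem.List.slice, PySem.List.clampIdx]
  · simp [pvCountE, PySem.List.slice_toNat row h h]

theorem pvCountE_succ (row : List String) (s a : Int) (h0 : 0 ≤ s) (h1 : s ≤ a) :
    pvCountE row s (a + 1)
      = pvCountE row s a + (if PySem.List.pyGetD row a "" = "E" then 1 else 0) := by
  have h0a : (0:Int) ≤ a := le_trans h0 h1
  have ht : (a + 1).toNat = a.toNat + 1 := by omega
  have hs : s.toNat ≤ a.toNat := by omega
  rw [pvCountE, pvCountE, PySem.List.slice_toNat row h0 (by omega),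
    PySem.List.slice_toNat row h0 h0a, ht]
  have hd : a.toNat + 1 - s.toNat = (a.toNat - s.toNat) + 1 := by omega
  rw [hd, List.take_add_one, List.count_append]
  have hidx : (List.drop s.toNat row)[a.toNat - s.toNat]? = row[a.toNat]? := by
    rw [List.getElem?_drop]; congr 1; omega
  rcases lt_or_ge a.toNat row.length with hlt | hge
  · have hsome : row[a.toNat]? = some row[a.toNat] := List.getElem?_eq_getElem hlt
    rw [hidx, hsome]
    have hg : PySem.List.pyGetD row a "" = row[a.toNat] :=
      PySem.List.pyGetD_eq_getElem row "" h0a (by omega)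
    rw [hg]
    by_cases he : row[a.toNat] = "E" <;> simp [he]
  · have hnone : row[a.toNat]? = none := List.getElem?_eq_none (by omega)
    rw [hidx, hnone]
    have hg : PySem.List.pyGetD row a "" = "" := by
      apply PySem.List.pyGetD_of_none
      simp only [PySem.List.pyGet?, PySem.List.pyIdx?]
      split_ifs <;> first | rfl | (exfalso; omega)
    rw [hg]
    simp

theorem pv_main (row : List String) (w : Int) :
    ∀ (m : Nat) (a s : Int) (sc : List Int), (w - a).toNat = m → 0 ≤ s → s ≤ a → a ≤ w →
      pvScanA row w a s (pvCountE row s a) sc = pvScanB row w a s sc := by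
  intro m
  induction m with
  | zero =>
    intro a s sc hm h0 h1 h2
    have haw : a = w := by omega
    subst haw
    simp [pvScanA, pvScanB, pvFillSeg, pvFillRow, pvCountE,
      PySem.List.pyRange_one_eq_nil (le_refl a)]
  | succ m ih =>
    intro a s sc hm h0 h1 h2
    have haw : a < w := by omega
    have h0a : (0:Int) ≤ a := le_trans h0 h1
    simp only [pvScanA, pvScanB, PySem.List.pyRange_one_cons haw, List.foldl_cons,
      List.filter_cons]
    by_cases hE : PySem.List.pyGetD row a "" = "E"
    · have hWf : (PySem.List.pyGetD row a "" == "W") = false := by simp [hE]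
      rw [pvStepSC_E _ _ _ _ _ hE, hWf]
      have ihh := ih (a + 1) s sc (by omega) h0 (by omega) (by omega)
      rw [pvCountE_succ row s a h0 h1, if_pos hE] at ihh
      simpa [pvScanA, pvScanB] using ihh
    · by_cases hW : PySem.List.pyGetD row a "" = "W"
      · have hWt : (PySem.List.pyGetD row a "" == "W") = true := by simp [hW]
        rw [pvStepSC_W _ _ _ _ _ hE hW, hWt]
        have ihh := ih (a + 1) a (pvFillRow row sc s a (pvCountE row s a))
          (by omega) h0a (by omega) (by omega)
        rw [pvCountE_succ row a a h0a (le_refl a), if_neg hE, pvCountE_self, add_zero] at ihh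
        simp only [pvScanA, pvScanB] at ihh
        simp only [if_true, List.cons_append, List.tail_cons, List.zip_cons_cons, List.foldl_cons]
        have hseg : pvFillSeg row sc s a = pvFillRow row sc s a (pvCountE row s a) := by
          simp only [pvFillSeg, pvFillRow, pvCountE]
        rw [hseg]
        simpa using ihh
      · have hWf : (PySem.List.pyGetD row a "" == "W") = false := by simp [hW]
        rw [pvStepSC_O _ _ _ _ _ hE hW, hWf]
        have ihh := ih (a + 1) s sc (by omega) h0 (by omega) (by omega)
        rw [pvCountE_succ row s a h0 h1, if_neg hE, add_zero] at ihh
        simpa [pvScanA, pvScanB] using ihh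

theorem pv_scan_body (row : List String) (w : Int) (r : List Int) :
    pvFillRow row
      ((List.foldl (pvStepSC row) (r, 0, 0) (PySem.List.pyRange 0 w)).1)
      ((List.foldl (pvStepSC row) (([] : List Int), 0, 0) (PySem.List.pyRange 0 w)).2.1) w
      ((List.foldl (pvStepSC row) (([] : List Int), 0, 0) (PySem.List.pyRange 0 w)).2.2)
    = pvScanA row w 0 0 0 r := by
  have h := pv_snd_const row (PySem.List.pyRange 0 w) ([]) r 0 0
  simp only [pvScanA]
  rw [h]

theorem pvA_eq_map (grid : List (List String)) :
    get_row_kill_scores grid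
      = grid.map (fun row =>
          pvScanA row ((PySem.List.pyGetD grid 0 []).length : Int) 0 0 0
            (List.replicate (PySem.List.pyGetD grid 0 []).length (0 : Int))) := by
  simp only [get_row_kill_scores, pv_inner_eq]
  simp only [pvFillA_modify, pv_modify_modify, pv_scan_body]
  rw [PySem.List.pyRange_one 0 ((PySem.List.pyGetD grid 0 []).length : Int),
      PySem.List.pyRange_one 0 (grid.length : Int)]
  simp only [sub_zero, Int.toNat_natCast, List.map_const', List.length_map,
    List.length_range, List.foldl_map, zero_add]
  have hfold := pv_foldl_range_modify
    (fun (i : Nat) (r : List Int) =>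
      pvScanA (PySem.List.pyGetD grid (i : Int) []) (((PySem.List.pyGetD grid 0 []).length : Int)) 0 0 0 r)
    (List.replicate grid.length (List.replicate (PySem.List.pyGetD grid 0 []).length 0)) []
  simp only [List.length_replicate, List.append_nil] at hfold
  rw [hfold, pv_mapIdx_replicate]
  apply List.ext_getElem
  · simp
  · intro i h1 h2
    simp only [List.getElem_map, List.getElem_range, PySem.List.pyGetD_natCast]
    congr 1
    rw [List.getD_eq_getElem?_getD, List.getElem?_eq_getElem (by simpa using h2)]
    rfl

theorem pvB_eq_map (grid : List (List String)) :
    get_row_kill_scores_alt grid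
      = grid.map (fun row =>
          pvScanB row ((PySem.List.pyGetD grid 0 []).length : Int) 0 0
            (List.replicate (PySem.List.pyGetD grid 0 []).length (0 : Int))) := by
  simp only [get_row_kill_scores_alt]
  rw [PySem.List.foldl_append_singleton_eq_map]
  refine (List.nil_append _).trans (List.map_congr_left (fun row _ => ?_))
  simp [pvScanB]

-- ===== VERDICT (by name: the statement is the Claim_ definition above) =====
theorem get_row_kill_scores_spec : Claim_equal_get_row_kill_scores := by
  intro grid _ _
  unfold Spec_get_row_kill_scores
  rw [pvA_eq_map, pvB_eq_map]
  refine List.map_congr_left (fun row _ => ?_)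
  have h0 : pvCountE row 0 0 = 0 := pvCountE_self row 0
  rw [← h0]
  exact pv_main row _ _ 0 0 _ rfl le_rfl le_rfl (by positivity)
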